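-- pv_equiv track=rewrite | github.com/FilipeSantiago/AxolotlDataScience | Graphics/BarChart.py | handle_data_to_plot_chart
-- ===== SOURCE A (Python) =====
-- import copy
--
-- def handle_data_to_plot_chart(attribute_values, class_values):
--
--     all_classes = list(set(class_values))
--     class_dicts = {}
--
--     unique_attributes = list(set(attribute_values))
--     attribute_dict = dict.fromkeys(unique_attributes, 0)
--
--     for unique_class in all_classes:
--         class_dicts[unique_class] = copy.deepcopy(attribute_dict)
--
--     for idx in range(len(attribute_values)):
--         class_dicts[class_values[idx]][attribute_values[idx]] += 1
--
--     return class_dicts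
-- ===== SOURCE B (Python) =====
-- def handle_data_to_plot_chart(attribute_values, class_values):
--     pairs = [(class_values[idx], attribute_values[idx])
--              for idx in range(len(attribute_values))]
--     return {c: {a: pairs.count((c, a)) for a in set(attribute_values)}
--             for c in set(class_values)}
-- ===== Notes on version B (the rewrite author's own statement) =====
-- stated objective: alternative
-- what changed: Replaces A's pre-zeroed deep-copied per-class templates mutated by an incrementing pass with a count-by-rescan: build the (class, attr) pair list once, then for every class/attribute cell compute its value directly as pairs.count((c, a)) -- no counting accumulator or in-place increments at all.
-- outside the precondition, e.g. on handle_data_to_plot_chart(['x', 'y'], ['a']): A raises IndexError, B raises IndexError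
import Mathlib
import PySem

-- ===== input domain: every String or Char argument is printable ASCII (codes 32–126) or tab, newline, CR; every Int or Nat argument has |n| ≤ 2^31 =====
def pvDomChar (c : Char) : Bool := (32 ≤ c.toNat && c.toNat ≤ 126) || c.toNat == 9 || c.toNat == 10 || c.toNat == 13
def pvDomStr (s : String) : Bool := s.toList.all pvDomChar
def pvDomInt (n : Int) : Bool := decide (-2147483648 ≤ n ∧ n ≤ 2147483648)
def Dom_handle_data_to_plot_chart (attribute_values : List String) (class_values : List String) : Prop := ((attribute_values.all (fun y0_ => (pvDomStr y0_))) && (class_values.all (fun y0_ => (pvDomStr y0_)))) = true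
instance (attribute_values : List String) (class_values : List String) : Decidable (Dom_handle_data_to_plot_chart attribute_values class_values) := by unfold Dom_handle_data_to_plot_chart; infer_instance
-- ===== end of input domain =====

-- B replaces A's pre-zeroed deep-copied per-class templates plus in-place increments with a
-- count-by-rescan: build the (class, attr) pair list once, then compute every cell directly as
-- pairs.count((c, a)) (objective: alternative; no counting accumulator at all, more rescans).
-- Nested dicts are returned as association lists; dict/set iteration order is Python-hash-dependent
-- and outputs are compared as (nested) dicts, ignoring order.

-- ===== PORT A =====
def handle_data_to_plot_chart (attribute_values : List String) (class_values : List String) : List (String × List (String × Int)) :=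
  let all_classes : List String := PySem.Set.ofList class_values
  let unique_attributes : List String := PySem.Set.ofList attribute_values
  -- dict.fromkeys(unique_attributes, 0)
  let attribute_dict : PySem.Dict String Int := PySem.Dict.ofList (unique_attributes.map (fun a => (a, (0 : Int))))
  -- for unique_class in all_classes: class_dicts[unique_class] = deepcopy(attribute_dict)
  let class_dicts0 : PySem.Dict String (PySem.Dict String Int) :=
    all_classes.foldl (fun d c => d.insert c attribute_dict) PySem.Dict.empty
  -- for idx in range(len(attribute_values)): class_dicts[class_values[idx]][attribute_values[idx]] += 1
  -- the '.getD ""' is a totality guard only: Pre_ guarantees idx is in range for both lists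
  -- (Python raises IndexError when class_values is shorter than attribute_values)
  let class_dicts :=
    (PySem.List.pyRange 0 (attribute_values.length : Int)).foldl (fun d idx =>
      let c := (PySem.List.pyGet? class_values idx).getD ""
      let a := (PySem.List.pyGet? attribute_values idx).getD ""
      d.modify c PySem.Dict.empty (fun inner => inner.modify a 0 (· + 1))) class_dicts0
  class_dicts.items.map (fun p => (p.1, p.2.items))

-- ===== PORT B =====
def handle_data_to_plot_chart_alt (attribute_values : List String) (class_values : List String) : List (String × List (String × Int)) :=
  -- pairs = [(class_values[idx], attribute_values[idx]) for idx in range(len(attribute_values))]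
  -- ('.getD ""' = totality guard, see Pre_)
  let pairs : List (String × String) :=
    (PySem.List.pyRange 0 (attribute_values.length : Int)).map (fun idx =>
      ((PySem.List.pyGet? class_values idx).getD "", (PySem.List.pyGet? attribute_values idx).getD ""))
  -- {c: {a: pairs.count((c, a)) for a in set(attribute_values)} for c in set(class_values)}
  (PySem.Set.ofList class_values).map (fun c =>
    (c, (PySem.Set.ofList attribute_values).map (fun a =>
      (a, (PySem.List.count pairs (c, a) : Int)))))

-- ===== PRECONDITION & SPEC =====
-- Pre_ excludes exactly the inputs where class_values is shorter than attribute_values: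
-- there Python A raises IndexError at class_values[idx] (and Python B raises identically).
def Pre_handle_data_to_plot_chart (attribute_values : List String) (class_values : List String) : Prop :=
  attribute_values.length ≤ class_values.length
instance (attribute_values : List String) (class_values : List String) : Decidable (Pre_handle_data_to_plot_chart attribute_values class_values) := by unfold Pre_handle_data_to_plot_chart; infer_instance

def pvWitness_handle_data_to_plot_chart : List String × List String := (["x", "y", "x"], ["a", "b", "a"])

def Spec_handle_data_to_plot_chart (attribute_values : List String) (class_values : List String) (out : List (String × List (String × Int))) : Prop := out = handle_data_to_plot_chart_alt attribute_values class_values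
instance (attribute_values : List String) (class_values : List String) (out : List (String × List (String × Int))) : Decidable (Spec_handle_data_to_plot_chart attribute_values class_values out) := by unfold Spec_handle_data_to_plot_chart; infer_instance

-- ===== CLAIM (what is proved, stated in full; the proofs are below) =====
def Claim_equal_handle_data_to_plot_chart : Prop := ∀ (attribute_values : List String) (class_values : List String), Dom_handle_data_to_plot_chart attribute_values class_values → Pre_handle_data_to_plot_chart attribute_values class_values → Spec_handle_data_to_plot_chart attribute_values class_values (handle_data_to_plot_chart attribute_values class_values)

-- ===== LEMMAS AND PROOFS =====

-- the index-paired (class, attribute) stream both versions traverse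
def pvZ (attribute_values class_values : List String) : List (String × String) :=
  (List.range attribute_values.length).map (fun k => (class_values.getD k "", attribute_values.getD k ""))

lemma pvZ_fst_mem (attrs cls : List String) (hpre : attrs.length ≤ cls.length)
    (p : String × String) (hp : p ∈ pvZ attrs cls) : p.1 ∈ cls := by
  simp only [pvZ, List.mem_map, List.mem_range] at hp
  obtain ⟨k, hk, rfl⟩ := hp
  have hkc : k < cls.length := lt_of_lt_of_le hk hpre
  rw [List.getD_eq_getElem _ _ hkc]
  exact List.getElem_mem hkc

lemma pvZ_snd_mem (attrs cls : List String)
    (p : String × String) (hp : p ∈ pvZ attrs cls) : p.2 ∈ attrs := by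
  simp only [pvZ, List.mem_map, List.mem_range] at hp
  obtain ⟨k, hk, rfl⟩ := hp
  rw [List.getD_eq_getElem _ _ hk]
  exact List.getElem_mem hk

-- A's index loop is a fold over pvZ
lemma pvLoopA (attrs cls : List String) (hpre : attrs.length ≤ cls.length)
    (init : PySem.Dict String (PySem.Dict String Int)) :
    (PySem.List.pyRange 0 (attrs.length : Int)).foldl (fun d idx =>
        d.modify ((PySem.List.pyGet? cls idx).getD "") PySem.Dict.empty
          (fun inner => inner.modify ((PySem.List.pyGet? attrs idx).getD "") 0 (· + 1))) init
    = (pvZ attrs cls).foldl (fun d p =>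
        d.modify p.1 PySem.Dict.empty (fun inner => inner.modify p.2 0 (· + 1))) init := by
  rw [PySem.List.pyRange_zero_natCast, List.foldl_map, pvZ, List.foldl_map]
  apply PySem.List.foldl_congr_mem
  intro d k hk
  rw [List.mem_range] at hk
  have hkc : k < cls.length := lt_of_lt_of_le hk hpre
  rw [PySem.List.pyGet?_natCast, PySem.List.pyGet?_natCast,
    List.getElem?_eq_getElem hk, List.getElem?_eq_getElem hkc,
    List.getD_eq_getElem _ _ hk, List.getD_eq_getElem _ _ hkc]
  rfl

-- B's pair comprehension is exactly pvZ
lemma pvPairsB (attrs cls : List String) (hpre : attrs.length ≤ cls.length) :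
    (PySem.List.pyRange 0 (attrs.length : Int)).map (fun idx =>
        ((PySem.List.pyGet? cls idx).getD "", (PySem.List.pyGet? attrs idx).getD ""))
    = pvZ attrs cls := by
  rw [PySem.List.pyRange_zero_natCast, List.map_map, pvZ]
  apply List.map_congr_left
  intro k hk
  rw [List.mem_range] at hk
  have hkc : k < cls.length := lt_of_lt_of_le hk hpre
  simp only [Function.comp, PySem.List.pyGet?_natCast,
    List.getElem?_eq_getElem hk, List.getElem?_eq_getElem hkc,
    List.getD_eq_getElem _ _ hk, List.getD_eq_getElem _ _ hkc, Option.getD_some]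

-- counting the attribute stream of one class counts (c, a) pairs
lemma pvCount_eq (zs : List (String × String)) (c a : String) :
    ((zs.filter (fun p => p.1 == c)).map Prod.snd).count a = zs.count (c, a) := by
  simp only [List.count, List.countP_map, List.countP_filter]
  apply List.countP_congr
  intro p _
  simp [Function.comp, beq_iff_eq, Prod.ext_iff, Bool.and_comm]

-- Set.update does nothing when every element is already present
lemma pvSet_update_of_mem (s : PySem.Set String) (l : List String)
    (h : ∀ x ∈ l, x ∈ s) : PySem.Set.update s l = s := by
  induction l generalizing s with
  | nil => rfl
  | cons x t ih =>
    have hx : PySem.Set.add s x = s := by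
      simp [PySem.Set.add, PySem.Set.contains, h x (List.mem_cons_self)]
    calc PySem.Set.update s (x :: t) = PySem.Set.update (PySem.Set.add s x) t := rfl
      _ = PySem.Set.update s t := by rw [hx]
      _ = s := ih s (fun y hy => h y (List.mem_cons_of_mem _ hy))

-- the dict.fromkeys(u, 0) template: items, keys, lookups
lemma pvFromkeys_items (u : List String) (hu : u.Nodup) :
    (PySem.Dict.ofList (u.map (fun a => (a, (0 : Int))))).items = u.map (fun a => (a, (0 : Int))) := by
  show (List.foldl (fun acc p => acc.insert p.1 p.2) PySem.Dict.empty (u.map (fun a => (a, (0 : Int))))).items = _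
  rw [List.foldl_map]
  simpa using PySem.Dict.items_foldl_insert_fresh u (fun a => a) (fun _ => (0 : Int))
    PySem.Dict.empty (fun a _ => PySem.Dict.contains_empty a) (by simpa using hu)

lemma pvFromkeys_keys (u : List String) (hu : u.Nodup) :
    (PySem.Dict.ofList (u.map (fun a => (a, (0 : Int))))).keys = u := by
  show ((PySem.Dict.ofList (u.map (fun a => (a, (0 : Int))))).items.map Prod.fst) = u
  rw [pvFromkeys_items u hu]; simp [Function.comp_def]

lemma pvFromkeys_getD (u : List String) (hu : u.Nodup) (x : String) :
    (PySem.Dict.ofList (u.map (fun a => (a, (0 : Int))))).getD x 0 = 0 := by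
  by_cases hx : x ∈ u
  · exact PySem.Dict.getD_of_mem_items _
      (by rw [pvFromkeys_items u hu]; exact List.mem_map_of_mem hx)
      (by rw [pvFromkeys_keys u hu]; exact hu) 0
  · refine PySem.Dict.getD_of_not_contains _ 0 ?_
    rw [PySem.Dict.contains_eq_decide_mem_keys, pvFromkeys_keys u hu]
    simpa using hx

-- the nested-increment loop of A, characterised entry by entry
lemma pvA_items (zs : List (String × String)) (d : PySem.Dict String (PySem.Dict String Int))
    (hnd : d.keys.Nodup) (hc : ∀ p ∈ zs, d.contains p.1 = true) :
    (zs.foldl (fun d p => d.modify p.1 PySem.Dict.empty (fun inner => inner.modify p.2 0 (· + 1))) d).items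
    = d.items.map (fun q => (q.1,
        ((zs.filter (fun p => p.1 == q.1)).map Prod.snd).foldl (fun inn a => inn.modify a 0 (· + 1)) q.2)) := by
  induction zs generalizing d with
  | nil => simp
  | cons p t ih =>
    have hcp : d.contains p.1 = true := hc p (List.mem_cons_self)
    rw [List.foldl_cons,
      ih (d.modify p.1 PySem.Dict.empty (fun inner => inner.modify p.2 0 (· + 1)))
        (by
          show ((d.insert p.1 _).keys).Nodup
          exact PySem.Dict.nodup_keys_insert _ _ _ hnd)
        (by
          intro r hr
          rw [PySem.Dict.contains_modify]
          simp [hc r (List.mem_cons_of_mem _ hr)])]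
    show ((d.insert p.1 ((d.getD p.1 PySem.Dict.empty).modify p.2 0 (· + 1))).items).map _ = _
    rw [PySem.Dict.items_insert_of_contains d _ hcp, List.map_map]
    apply List.map_congr_left
    intro q hq
    by_cases hqp : q.1 = p.1
    · have hget : d.getD p.1 PySem.Dict.empty = q.2 := by
        refine PySem.Dict.getD_of_mem_items d ?_ hnd PySem.Dict.empty
        rw [← hqp]; simpa using hq
      simp only [Function.comp, hqp, beq_self_eq_true, if_pos, hget,
        List.filter_cons, List.map_cons, List.foldl_cons]
    · have h1 : (q.1 == p.1) = false := by simpa using hqp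
      have h2 : (p.1 == q.1) = false := by simpa using fun h => hqp h.symm
      simp [Function.comp, h1, h2]

theorem handle_data_to_plot_chart_spec : Claim_equal_handle_data_to_plot_chart := by
  intro attrs cls _hdom hpre
  unfold Spec_handle_data_to_plot_chart handle_data_to_plot_chart handle_data_to_plot_chart_alt
  dsimp only
  have hpre' : attrs.length ≤ cls.length := hpre
  rw [pvLoopA attrs cls hpre', pvPairsB attrs cls hpre']
  set u : List String := PySem.Set.ofList attrs with hu
  set w : List String := PySem.Set.ofList cls with hw
  have hund : u.Nodup := PySem.Set.nodup_ofList attrs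
  have hwnd : w.Nodup := PySem.Set.nodup_ofList cls
  set ad : PySem.Dict String Int := PySem.Dict.ofList (u.map (fun a => (a, (0 : Int)))) with had
  -- A's template dict of zeroed class rows
  have h0 : (w.foldl (fun d c => d.insert c ad) PySem.Dict.empty).items = w.map (fun c => (c, ad)) := by
    simpa using PySem.Dict.items_foldl_insert_fresh w (fun c => c) (fun _ => ad)
      PySem.Dict.empty (fun c _ => PySem.Dict.contains_empty c) (by simpa using hwnd)
  have h0k : (w.foldl (fun d c => d.insert c ad) PySem.Dict.empty).keys = w := by
    show ((w.foldl (fun d c => d.insert c ad) PySem.Dict.empty).items.map Prod.fst) = w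
    rw [h0]; simp [Function.comp_def]
  rw [pvA_items (pvZ attrs cls) _ (by rw [h0k]; exact hwnd)
      (by
        intro p hp
        rw [PySem.Dict.contains_eq_decide_mem_keys, h0k]
        simpa [hw, PySem.Set.mem_ofList] using pvZ_fst_mem attrs cls hpre' p hp),
    h0, List.map_map, List.map_map]
  apply List.map_congr_left
  intro c _
  simp only [Function.comp]
  refine Prod.ext rfl ?_
  -- the inner row of class c
  set lc : List String := ((pvZ attrs cls).filter (fun p => p.1 == c)).map Prod.snd with hlc
  have hlck : (lc.foldl (fun inn a => inn.modify a 0 (· + 1)) ad).keys = u := by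
    rw [PySem.Dict.keys_foldl_modify_key lc (fun a => a) 0 (fun _ _ => (· + 1)) ad,
      pvFromkeys_keys u hund]
    simp only [List.map_id']
    apply pvSet_update_of_mem
    intro x hx
    rw [hlc] at hx
    obtain ⟨p, hp, rfl⟩ := List.mem_map.mp hx
    exact (PySem.Set.mem_ofList attrs p.2).mpr (pvZ_snd_mem attrs cls p (List.mem_of_mem_filter hp))
  rw [PySem.Dict.items_eq_map_keys _ (by rw [hlck]; exact hund) 0, hlck]
  apply List.map_congr_left
  intro a _
  refine Prod.ext rfl ?_
  show (lc.foldl (fun inn x => inn.modify x 0 (· + 1)) ad).getD a 0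
    = (PySem.List.count (pvZ attrs cls) (c, a) : Int)
  rw [PySem.Dict.getD_foldl_modify_add_one lc ad a, pvFromkeys_getD u hund a,
    PySem.List.count_eq, hlc, pvCount_eq]
  simp
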